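-- pv_equiv track=rewrite | github.com/dem0nx309/anibridge-mappings | src/anibridge_mappings/utils/mapping.py | _expand_numeric_targets
-- ===== SOURCE A (Python) =====
-- def split_ratio(range_key: str) -> tuple[str, int | None] | None:
--     """Split a range key into base range and optional ratio."""
--     if "|" not in range_key:
--         return range_key, None
--     base, ratio_raw = range_key.split("|", 1)
--     if ratio_raw == "":
--         return None
--     try:
--         ratio = int(ratio_raw)
--     except ValueError:
--         return None
--     if ratio == 0:
--         return None
--     return base, ratio
--
-- def parse_range_bounds(range_key: str) -> tuple[int, int | None] | None:
--     """Return inclusive (start, end) bounds for a normalized range key.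
--
--     Args:
--         range_key (str): Normalized range key.
--
--     Returns:
--         tuple[int, int | None] | None: Parsed bounds or `None` if invalid.
--     """
--     if not range_key:
--         return None
--     normalized = range_key.strip()
--     if not normalized:
--         return None
--
--     if "," in normalized:
--         return None
--
--     split = split_ratio(normalized)
--     if split is None:
--         return None
--     base, _ratio = split
--
--     if "-" in base:
--         left, right = base.split("-", 1)
--         try:
--             start = int(left)
--         except ValueError:
--             return None
--         end: int | None
--         if right == "":
--             end = None
--         else:
--             try:
--                 end = int(right)
--             except ValueError:
--                 return None
--         if end is not None and start > end:
--             start, end = end, start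
--         return (start, end)
--     try:
--         value = int(base)
--     except ValueError:
--         return None
--     return (value, value)
--
-- def _expand_numeric_targets(values: set[str]) -> list[int]:
--     """Expand numeric target range strings into integers."""
--     numbers: set[int] = set()
--     for value in values:
--         bounds = parse_range_bounds(value)
--         if bounds is not None and bounds[1] is not None:
--             numbers.update(range(bounds[0], bounds[1] + 1))
--         elif value.isdigit():
--             numbers.add(int(value))
--     return sorted(numbers)
-- ===== SOURCE B (Python) =====
-- def _interval(value):
--     """Closed integer interval contributed by one target string, or None."""
--     v = value.strip()
--     if not v or "," in v:
--         return None
--     cut = v.find("|")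
--     if cut >= 0:
--         try:
--             if int(v[cut + 1:]) == 0:
--                 return None
--         except ValueError:
--             return None
--         base = v[:cut]
--     else:
--         base = v
--     dash = base.find("-")
--     try:
--         if dash < 0:
--             n = int(base)
--             return (n, n)
--         a = int(base[:dash])
--         b = int(base[dash + 1:])
--     except ValueError:
--         return None
--     return (a, b) if a <= b else (b, a)
--
-- def _expand_numeric_targets(values):
--     """Expand numeric targets by sorting per-value intervals and merging them."""
--     intervals = []
--     for value in values:
--         iv = _interval(value)
--         if iv is None and value.isdigit():
--             n = int(value)
--             iv = (n, n)
--         if iv is not None: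
--             intervals.append(iv)
--     intervals.sort(key=lambda p: p[0])
--     merged = []
--     cur = None
--     for s, e in intervals:
--         if cur is None:
--             cur = (s, e)
--         elif s <= cur[1] + 1:
--             cur = (cur[0], max(cur[1], e))
--         else:
--             merged.append(cur)
--             cur = (s, e)
--     if cur is not None:
--         merged.append(cur)
--     out = []
--     for s, e in merged:
--         out.extend(range(s, e + 1))
--     return out
-- ===== Notes on version B (the rewrite author's own statement) =====
-- stated objective: alternative
-- what changed: Replaces the helper-chain parsing (split_ratio/parse_range_bounds via split) plus hash-set accumulation and final sorted(set) with a single find/slice-based interval parser per value, then sorting the collected (start,end) intervals by start, merging overlapping/adjacent ones and enumerating the disjoint merged ranges in order.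
import Mathlib
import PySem

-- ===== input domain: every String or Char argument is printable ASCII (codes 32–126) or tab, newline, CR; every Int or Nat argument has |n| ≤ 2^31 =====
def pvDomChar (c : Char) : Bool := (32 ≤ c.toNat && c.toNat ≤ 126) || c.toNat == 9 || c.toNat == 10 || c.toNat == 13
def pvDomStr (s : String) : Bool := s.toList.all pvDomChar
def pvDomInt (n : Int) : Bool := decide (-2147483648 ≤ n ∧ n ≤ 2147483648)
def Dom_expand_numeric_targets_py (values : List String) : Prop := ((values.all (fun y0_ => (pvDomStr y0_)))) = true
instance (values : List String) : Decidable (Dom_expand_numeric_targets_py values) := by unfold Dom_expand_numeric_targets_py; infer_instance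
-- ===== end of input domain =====

-- B replaces A's helper-chain parsing (split_ratio / parse_range_bounds via split) and hash-set
-- dedup + final sort by a find/slice-based per-value interval parser, sorting the collected
-- (start,end) intervals, merging overlapping/adjacent ones and enumerating the merged ranges
-- (alternative algorithm, same cost class).

-- ===== PORT A =====
-- helper, port of split_ratio
def split_ratio (range_key : String) : Option (String × Option Int) :=
  if ¬ (PySem.Str.isIn "|" range_key) then some (range_key, none)
  else
    -- "|" is in range_key, so split("|", 1) yields exactly two pieces
    match PySem.Str.splitMax? range_key "|" 1 with
    | some [base, ratio_raw] =>
        if ratio_raw = "" then none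
        else match PySem.Int.ofStr? ratio_raw with
          | none => none
          | some ratio => if ratio = 0 then none else some (base, some ratio)
    | _ => none

-- helper, port of parse_range_bounds
def parse_range_bounds (range_key : String) : Option (Int × Option Int) :=
  if range_key = "" then none
  else
    let normalized := PySem.Str.strip range_key
    if normalized = "" then none
    else if PySem.Str.isIn "," normalized then none
    else
      match split_ratio normalized with
      | none => none
      | some (base, _ratio) =>
        if PySem.Str.isIn "-" base then
          -- "-" is in base, so split("-", 1) yields exactly two pieces
          match PySem.Str.splitMax? base "-" 1 with
          | some [left, right] =>
            match PySem.Int.ofStr? left with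
            | none => none
            | some start =>
              if right = "" then some (start, none)
              else match PySem.Int.ofStr? right with
                | none => none
                | some e => if start > e then some (e, some start) else some (start, some e)
          | _ => none
        else
          match PySem.Int.ofStr? base with
          | none => none
          | some v => some (v, some v)

def expand_numeric_targets_py (values : List String) : List Int :=
  let numbers : PySem.Set Int := values.foldl (fun ns value =>
    match parse_range_bounds value with
    | some (s, some e) => PySem.Set.update ns (PySem.List.pyRange s (e + 1) 1)
    | _ =>
      if PySem.Str.strIsdigit value then
        -- int(value) cannot raise here: value.isdigit() holds
        match PySem.Int.ofStr? value with
        | some n => PySem.Set.add ns n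
        | none => ns
      else ns) PySem.Set.empty
  PySem.List.sorted numbers (fun x => x) false

-- ===== PORT B =====
-- port of Source B's _bounds: parse "a-b" or "n" into a closed interval via find/slice
def pvBounds (base : String) : Option (Int × Int) :=
  let dash := PySem.Str.find base "-"
  if dash < 0 then
    match PySem.Int.ofStr? base with
    | some n => some (n, n)
    | none => none
  else
    match PySem.Int.ofStr? (PySem.Str.slice base none (some dash)),
          PySem.Int.ofStr? (PySem.Str.slice base (some (dash + 1)) none) with
    | some a, some b => if a ≤ b then some (a, b) else some (b, a)
    | _, _ => none

-- port of Source B's _interval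
def pvInterval (value : String) : Option (Int × Int) :=
  let v := PySem.Str.strip value
  if v = "" then none
  else if PySem.Str.isIn "," v then none
  else
    let cut := PySem.Str.find v "|"
    if cut < 0 then pvBounds v
    else
      match PySem.Int.ofStr? (PySem.Str.slice v (some (cut + 1)) none) with
      | some r => if r = 0 then none else pvBounds (PySem.Str.slice v none (some cut))
      | none => none

-- Source B's collection loop: one interval per contributing value (with the isdigit fallback)
def pvCollect : List String → List (Int × Int)
  | [] => []
  | value :: rest =>
    match pvInterval value with
    | some iv => iv :: pvCollect rest
    | none =>
      if PySem.Str.strIsdigit value then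
        match PySem.Int.ofStr? value with
        | some n => (n, n) :: pvCollect rest
        | none => pvCollect rest
      else pvCollect rest

-- merge loop: (cs, ce) is Source B's `cur`, absorbing or emitting as in the Python loop
def pvMergeGo (cs ce : Int) : List (Int × Int) → List (Int × Int)
  | [] => [(cs, ce)]
  | (s, e) :: rest =>
    if s ≤ ce + 1 then pvMergeGo cs (max ce e) rest
    else (cs, ce) :: pvMergeGo s e rest

def expand_numeric_targets_py_alt (values : List String) : List Int :=
  let sortedIvs := PySem.List.sorted (pvCollect values) (fun p => p.1) false
  let merged :=
    match sortedIvs with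
    | [] => []
    | (s, e) :: rest => pvMergeGo s e rest
  merged.flatMap (fun p => PySem.List.pyRange p.1 (p.2 + 1) 1)

-- ===== PRECONDITION & SPEC =====
def Spec_expand_numeric_targets_py (values : List String) (out : List Int) : Prop := out = expand_numeric_targets_py_alt values
instance (values : List String) (out : List Int) : Decidable (Spec_expand_numeric_targets_py values out) := by unfold Spec_expand_numeric_targets_py; infer_instance

-- ===== CLAIM (what is proved, stated in full; the proofs are below) =====
def Claim_equal_expand_numeric_targets_py : Prop := ∀ (values : List String), Dom_expand_numeric_targets_py values → Spec_expand_numeric_targets_py values (expand_numeric_targets_py values)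

-- ===== LEMMAS AND PROOFS =====

-- project a parse_range_bounds result onto the closed intervals B cares about
def pvClose : Option (Int × Option Int) → Option (Int × Int)
  | some (s, some e) => some (s, e)
  | _ => none

-- the first occurrence of c: dropWhile at the first hit starts with c
lemma pv_dropWhile_cons (c : Char) :
    ∀ (s : List Char), c ∈ s →
      s.dropWhile (fun x => x != c) = c :: (s.dropWhile (fun x => x != c)).tail := by
  intro s
  induction s with
  | nil => intro h; exact absurd h (List.not_mem_nil)
  | cons a s' ih =>
    intro h
    by_cases hac : a = c
    · subst hac
      simp [List.dropWhile]
    · have hmem : c ∈ s' := by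
        rcases List.mem_cons.mp h with h' | h'
        · exact absurd h'.symm hac
        · exact h'
      have : (a != c) = true := by simp [hac]
      simp only [List.dropWhile, this]
      exact ih hmem

lemma pv_decomp (c : Char) (s : List Char) (h : c ∈ s) :
    s = s.takeWhile (fun x => x != c) ++ c :: (s.dropWhile (fun x => x != c)).tail := by
  conv_lhs => rw [← List.takeWhile_append_dropWhile (p := fun x => x != c) (l := s)]
  rw [← pv_dropWhile_cons c s h]

lemma pv_singleton_prefix {c : Char} {l : List Char} : [c] <+: l ↔ ∃ t, l = c :: t := by
  constructor
  · rintro ⟨t, rfl⟩; exact ⟨t, rfl⟩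
  · rintro ⟨t, rfl⟩; exact ⟨t, rfl⟩

lemma pv_find_first (c : Char) (s : List Char) (h : c ∈ s) :
    PySem.Chars.find s [c] = ((s.takeWhile (fun x => x != c)).length : Int) := by
  have hdec := pv_decomp c s h
  set tw := s.takeWhile (fun x => x != c) with htw
  set tl := (s.dropWhile (fun x => x != c)).tail with htl
  have hinfix : [c] <:+: s := ⟨tw, tl, by rw [hdec]; simp⟩
  have h0 : 0 ≤ PySem.Chars.find s [c] := (PySem.Chars.find_nonneg_iff s [c]).mpr hinfix
  obtain ⟨hpre, hmin⟩ := PySem.Chars.find_spec h0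
  have hk : [c] <+: s.drop tw.length := by
    rw [hdec, List.drop_left]
    exact ⟨tl, rfl⟩
  have hklt : ∀ i, i < tw.length → ¬ [c] <+: s.drop i := by
    intro i hi hp
    rcases pv_singleton_prefix.mp hp with ⟨t, ht⟩
    have hgl : s.drop i = tw[i] :: (tw.drop (i+1) ++ c :: tl) := by
      rw [hdec, List.drop_append_of_le_length (by omega), List.drop_eq_getElem_cons hi,
        List.cons_append]
    rw [hgl] at ht
    have hc : tw[i] = c := by injection ht
    have hmemtw : tw[i] ∈ s.takeWhile (fun x => x != c) := by
      rw [← htw]; exact List.getElem_mem _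
    have hne := List.mem_takeWhile_imp hmemtw
    rw [hc] at hne
    simp at hne
  have hle1 : (PySem.Chars.find s [c]).toNat ≤ tw.length := by
    by_contra hlt
    exact (hmin tw.length (by omega)) hk
  have hle2 : tw.length ≤ (PySem.Chars.find s [c]).toNat := by
    by_contra hlt
    exact (hklt _ (by omega)) hpre
  omega

lemma pv_go_zero (c : Char) (fuel : Nat) (l : List Char) (acc : List (List Char)) :
    PySem.Chars.splitOnMax.go [c] fuel 0 l [] acc = acc.reverse ++ [l] := by
  cases fuel with
  | zero => simp [PySem.Chars.splitOnMax.go]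
  | succ n =>
    cases l with
    | nil => simp [PySem.Chars.splitOnMax.go]
    | cons a t => simp [PySem.Chars.splitOnMax.go]

lemma pv_go_found (c : Char) :
    ∀ (l : List Char) (fuel : Nat) (cur : List Char) (acc : List (List Char)),
      l.length ≤ fuel → c ∈ l →
      PySem.Chars.splitOnMax.go [c] fuel 1 l cur acc =
        acc.reverse ++ [cur.reverse ++ l.takeWhile (fun x => x != c),
                        (l.dropWhile (fun x => x != c)).tail] := by
  intro l
  induction l with
  | nil => intro fuel cur acc _ h; exact absurd h (List.not_mem_nil)
  | cons a t ih =>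
    intro fuel cur acc hfuel h
    obtain ⟨n, rfl⟩ : ∃ n, fuel = n + 1 := ⟨fuel - 1, by simp at hfuel; omega⟩
    by_cases hac : a = c
    · subst hac
      have hpref : [a].isPrefixOf (a :: t) = true := by simp [List.isPrefixOf]
      simp only [PySem.Chars.splitOnMax.go, hpref]
      norm_num
      rw [pv_go_zero]
      simp [List.dropWhile]
    · have hmem : c ∈ t := by
        rcases List.mem_cons.mp h with h' | h'
        · exact absurd h'.symm hac
        · exact h'
      have hpref : [c].isPrefixOf (a :: t) = false := by
        simp [List.isPrefixOf]
        intro hh; exact absurd hh.symm hac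
      have hane : (a != c) = true := by simp [hac]
      simp only [PySem.Chars.splitOnMax.go, hpref]
      norm_num
      rw [ih n (a :: cur) acc (by simp at hfuel ⊢; omega) hmem]
      simp [List.takeWhile, List.dropWhile, hane]

lemma pv_splitOnMax_first (c : Char) (s : List Char) (h : c ∈ s) :
    PySem.Chars.splitOnMax s [c] 1 =
      [s.takeWhile (fun x => x != c), (s.dropWhile (fun x => x != c)).tail] := by
  rw [PySem.Chars.splitOnMax]
  norm_num
  rw [pv_go_found c s (s.length + 1) [] [] (by omega) h]
  simp

lemma pv_splitMax?_first (v : String) (c : Char) (sep : String) (hsep : sep.toList = [c])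
    (h : c ∈ v.toList) :
    PySem.Str.splitMax? v sep 1 =
      some [String.ofList (v.toList.takeWhile (fun x => x != c)),
            String.ofList ((v.toList.dropWhile (fun x => x != c)).tail)] := by
  rw [PySem.Str.splitMax?, hsep, PySem.Chars.splitMax?]
  simp only [List.isEmpty_cons]
  rw [pv_splitOnMax_first c _ h]
  rfl

-- slices of a string at the first occurrence of c agree with takeWhile / dropWhile.tail
lemma pv_slice_to_first (v : String) (c : Char) (sep : String) (hsep : sep.toList = [c])
    (h : c ∈ v.toList) :
    (PySem.Str.slice v none (some (PySem.Str.find v sep))).toList =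
      v.toList.takeWhile (fun x => x != c) := by
  have hdec := pv_decomp c v.toList h
  set tw := v.toList.takeWhile (fun x => x != c) with htw
  set tl := (v.toList.dropWhile (fun x => x != c)).tail with htl
  rw [PySem.Str.toList_slice, PySem.Str.find_eq, hsep, pv_find_first c _ h,
    PySem.Chars.slice_eq_listSlice, ← htw, PySem.List.slice_to _ (by positivity),
    Int.toNat_natCast, hdec, List.take_left]

lemma pv_slice_from_first (v : String) (c : Char) (sep : String) (hsep : sep.toList = [c])
    (h : c ∈ v.toList) :
    (PySem.Str.slice v (some (PySem.Str.find v sep + 1)) none).toList =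
      (v.toList.dropWhile (fun x => x != c)).tail := by
  have hdec := pv_decomp c v.toList h
  set tw := v.toList.takeWhile (fun x => x != c) with htw
  set tl := (v.toList.dropWhile (fun x => x != c)).tail with htl
  rw [PySem.Str.toList_slice, PySem.Str.find_eq, hsep, pv_find_first c _ h,
    PySem.Chars.slice_eq_listSlice, ← htw, PySem.List.slice_from _ (by positivity)]
  have hN : (((tw.length : Int)) + 1).toNat = tw.length + 1 := by omega
  rw [hN, hdec, ← List.drop_drop, List.drop_left, List.drop_one, List.tail_cons]

lemma pv_find_neg {v sep : String} (h : ¬ PySem.Str.isIn sep v) :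
    PySem.Str.find v sep < 0 := by
  have h1 : ¬ (0 ≤ PySem.Str.find v sep) := by
    rw [PySem.Str.find_nonneg_iff]
    rw [PySem.Str.isIn_iff_infix] at h
    exact h
  omega

lemma pv_isIn_mem {v sep : String} {c : Char} (hsep : sep.toList = [c]) :
    PySem.Str.isIn sep v ↔ c ∈ v.toList := by
  rw [PySem.Str.isIn_iff_infix, hsep]
  constructor
  · rintro ⟨pre, suf, hps⟩
    rw [← hps]; simp
  · intro h
    refine ⟨v.toList.takeWhile (fun x => x != c), (v.toList.dropWhile (fun x => x != c)).tail, ?_⟩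
    rw [List.append_assoc, List.singleton_append]
    exact (pv_decomp c _ h).symm

lemma pv_ofStr_toList (s t : String) (h : s.toList = t.toList) :
    PySem.Int.ofStr? s = PySem.Int.ofStr? t := by
  rw [PySem.Int.ofStr?, PySem.Int.ofStr?, h]

lemma pv_empty_iff (s : String) : s = "" ↔ s.toList = [] := by
  constructor
  · rintro rfl; rfl
  · intro h
    have := congrArg String.ofList h
    simpa using this

-- B's pvBounds computes exactly the closed-interval projection of A's "-"-part on a base
-- string with the same characters.
lemma pv_bounds_eq (bA bB : String) (h : bA.toList = bB.toList) :
    pvBounds bB = pvClose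
      (if PySem.Str.isIn "-" bA then
          match PySem.Str.splitMax? bA "-" 1 with
          | some [left, right] =>
            match PySem.Int.ofStr? left with
            | none => none
            | some start =>
              if right = "" then some (start, none)
              else match PySem.Int.ofStr? right with
                | none => none
                | some e => if start > e then some (e, some start) else some (start, some e)
          | _ => none
        else
          match PySem.Int.ofStr? bA with
          | none => none
          | some v => some (v, some v)) := by
  by_cases hdash : PySem.Str.isIn "-" bA
  · have hA : '-' ∈ bA.toList := (pv_isIn_mem (v := bA) rfl).mp hdash
    have hB : '-' ∈ bB.toList := h ▸ hA
    have hfind : 0 ≤ PySem.Str.find bB "-" := by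
      rw [PySem.Str.find_nonneg_iff]
      exact (PySem.Str.isIn_iff_infix _ _).mp ((pv_isIn_mem (v := bB) rfl).mpr hB)
    have hleft : PySem.Int.ofStr? (PySem.Str.slice bB none (some (PySem.Str.find bB "-"))) =
        PySem.Int.ofChars? (bA.toList.takeWhile (fun x => x != '-')) := by
      rw [PySem.Int.ofStr?, pv_slice_to_first bB '-' "-" rfl hB, h]
    have hright : PySem.Int.ofStr? (PySem.Str.slice bB (some (PySem.Str.find bB "-" + 1)) none) =
        PySem.Int.ofChars? ((bA.toList.dropWhile (fun x => x != '-')).tail) := by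
      rw [PySem.Int.ofStr?, pv_slice_from_first bB '-' "-" rfl hB, h]
    rw [pvBounds, if_neg (by omega), hleft, hright, if_pos hdash,
      pv_splitMax?_first bA '-' "-" rfl hA]
    simp only []
    rw [PySem.Int.ofStr?_ofList]
    cases ha : PySem.Int.ofChars? (bA.toList.takeWhile (fun x => x != '-')) with
    | none => rfl
    | some a =>
      cases hb : PySem.Int.ofChars? ((bA.toList.dropWhile (fun x => x != '-')).tail) with
      | none =>
        dsimp only
        by_cases hre : String.ofList ((bA.toList.dropWhile (fun x => x != '-')).tail) = ""
        · rw [if_pos hre]; rfl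
        · rw [if_neg hre, PySem.Int.ofStr?_ofList, hb]; rfl
      | some b =>
        have hre : ¬ String.ofList ((bA.toList.dropWhile (fun x => x != '-')).tail) = "" := by
          intro he
          have : (bA.toList.dropWhile (fun x => x != '-')).tail = [] := by
            rw [pv_empty_iff] at he; simpa using he
          rw [this] at hb
          exact absurd hb (by rw [show PySem.Int.ofChars? [] = none from rfl]; simp)
        dsimp only
        rw [if_neg hre, PySem.Int.ofStr?_ofList, hb]
        by_cases hab : a ≤ b
        · rw [if_pos hab]; dsimp only; rw [if_neg (by omega)]; rfl
        · rw [if_neg hab]; dsimp only; rw [if_pos (by omega)]; rfl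
  · have hfind : PySem.Str.find bB "-" < 0 := by
      apply pv_find_neg
      intro hc
      exact hdash ((pv_isIn_mem (v := bA) rfl).mpr (h ▸ (pv_isIn_mem (v := bB) rfl).mp hc))
    rw [pvBounds, if_pos hfind, if_neg hdash, pv_ofStr_toList bB bA h.symm]
    cases hn : PySem.Int.ofStr? bA with
    | none => rfl
    | some n => rfl

-- pvInterval is exactly the closed-interval projection of parse_range_bounds
lemma pv_interval_eq (v : String) :
    pvInterval v = pvClose (parse_range_bounds v) := by
  rw [pvInterval, parse_range_bounds]
  by_cases hw : PySem.Str.strip v = ""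
  · rw [if_pos hw]
    by_cases hv : v = ""
    · rw [if_pos hv]; rfl
    · rw [if_neg hv]; dsimp only; rw [if_pos hw]; rfl
  · have hv : ¬ v = "" := fun hh => hw (by rw [hh]; rfl)
    rw [if_neg hw, if_neg hv]
    dsimp only
    rw [if_neg hw]
    by_cases hcm : PySem.Str.isIn "," (PySem.Str.strip v)
    · rw [if_pos hcm, if_pos hcm]; rfl
    · rw [if_neg hcm, if_neg hcm]
      by_cases hpipe : PySem.Str.isIn "|" (PySem.Str.strip v)
      · have hmem : '|' ∈ (PySem.Str.strip v).toList :=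
          (pv_isIn_mem (v := PySem.Str.strip v) rfl).mp hpipe
        have hcut : 0 ≤ PySem.Str.find (PySem.Str.strip v) "|" := by
          rw [PySem.Str.find_nonneg_iff]
          exact (PySem.Str.isIn_iff_infix _ _).mp hpipe
        rw [if_neg (by omega)]
        have hsr0 : split_ratio (PySem.Str.strip v) =
            (if String.ofList (((PySem.Str.strip v).toList.dropWhile (fun x => x != '|')).tail) = ""
              then none
              else
                match PySem.Int.ofChars? (((PySem.Str.strip v).toList.dropWhile (fun x => x != '|')).tail) with
                | none => none
                | some ratio =>
                  if ratio = 0 then none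
                  else some (String.ofList ((PySem.Str.strip v).toList.takeWhile (fun x => x != '|')), some ratio)) := by
          rw [split_ratio, if_neg (not_not_intro hpipe),
            pv_splitMax?_first _ '|' "|" rfl hmem]
          dsimp only
          rw [PySem.Int.ofStr?_ofList]
        have hratio : PySem.Int.ofStr? (PySem.Str.slice (PySem.Str.strip v)
              (some (PySem.Str.find (PySem.Str.strip v) "|" + 1)) none) =
            PySem.Int.ofChars? (((PySem.Str.strip v).toList.dropWhile (fun x => x != '|')).tail) := by
          rw [PySem.Int.ofStr?, pv_slice_from_first _ '|' "|" rfl hmem]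
        rw [hratio]
        cases hr : PySem.Int.ofChars? (((PySem.Str.strip v).toList.dropWhile (fun x => x != '|')).tail) with
        | none =>
          dsimp only
          by_cases hre : String.ofList (((PySem.Str.strip v).toList.dropWhile (fun x => x != '|')).tail) = ""
          · rw [hsr0, if_pos hre]; rfl
          · rw [hsr0, if_neg hre, hr]; rfl
        | some r =>
          have hre : ¬ String.ofList (((PySem.Str.strip v).toList.dropWhile (fun x => x != '|')).tail) = "" := by
            intro he
            have htl : (((PySem.Str.strip v).toList.dropWhile (fun x => x != '|')).tail) = [] := by
              rw [pv_empty_iff] at he; simpa using he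
            rw [htl] at hr
            exact absurd hr (by rw [show PySem.Int.ofChars? [] = none from rfl]; simp)
          rw [hsr0, if_neg hre, hr]
          dsimp only
          by_cases hr0 : r = 0
          · rw [if_pos hr0, if_pos hr0]; rfl
          · rw [if_neg hr0, if_neg hr0]
            dsimp only
            exact pv_bounds_eq
              (String.ofList ((PySem.Str.strip v).toList.takeWhile (fun x => x != '|')))
              (PySem.Str.slice (PySem.Str.strip v) none (some (PySem.Str.find (PySem.Str.strip v) "|")))
              (by rw [String.toList_ofList, pv_slice_to_first _ '|' "|" rfl hmem])
      · have hcut : PySem.Str.find (PySem.Str.strip v) "|" < 0 := pv_find_neg hpipe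
        have hsr : split_ratio (PySem.Str.strip v) = some (PySem.Str.strip v, none) := by
          rw [split_ratio, if_pos (by simpa using hpipe)]
        rw [if_pos hcut, hsr]
        dsimp only
        exact pv_bounds_eq (PySem.Str.strip v) (PySem.Str.strip v) rfl

-- proof-side collect over parse_range_bounds (what pvCollect amounts to)
def pvIvs : List String → List (Int × Int)
  | [] => []
  | value :: rest =>
    match parse_range_bounds value with
    | some (s, some e) => (s, e) :: pvIvs rest
    | _ =>
      if PySem.Str.strIsdigit value then
        match PySem.Int.ofStr? value with
        | some n => (n, n) :: pvIvs rest
        | none => pvIvs rest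
      else pvIvs rest

lemma pvCollect_eq_pvIvs : ∀ (values : List String), pvCollect values = pvIvs values := by
  intro values
  induction values with
  | nil => rfl
  | cons v rest ih =>
    show pvCollect (v :: rest) = pvIvs (v :: rest)
    rw [pvCollect, pvIvs, pv_interval_eq]
    cases hp : parse_range_bounds v with
    | none => simp only [pvClose, ih]
    | some p =>
      obtain ⟨s, e?⟩ := p
      cases e? with
      | none => simp only [pvClose, ih]
      | some e => simp only [pvClose, ih]

lemma parse_bounds_le {v : String} {s e : Int}
    (h : parse_range_bounds v = some (s, some e)) : s ≤ e := by
  simp only [parse_range_bounds] at h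
  repeat' split at h
  all_goals simp only [Option.some.injEq, Prod.mk.injEq, reduceCtorEq, and_false] at h
  all_goals omega

lemma pvIvs_cons (v : String) (rest : List String) :
    pvIvs (v :: rest) =
      match parse_range_bounds v with
      | some (s, some e) => (s, e) :: pvIvs rest
      | _ =>
        if PySem.Str.strIsdigit v then
          match PySem.Int.ofStr? v with
          | some n => (n, n) :: pvIvs rest
          | none => pvIvs rest
        else pvIvs rest := rfl

lemma collect_bounds : ∀ (values : List String), ∀ p ∈ pvIvs values, p.1 ≤ p.2 := by
  intro values
  induction values with
  | nil => simp [pvIvs]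
  | cons v rest ih =>
    intro p hp
    rw [pvIvs_cons] at hp
    split at hp
    · rename_i s e heq
      rcases List.mem_cons.mp hp with h | h
      · subst h; exact parse_bounds_le heq
      · exact ih p h
    · split at hp
      · split at hp
        · rcases List.mem_cons.mp hp with h | h
          · subst h; exact le_refl _
          · exact ih p h
        · exact ih p hp
      · exact ih p hp

lemma mem_A_fold (x : Int) :
    ∀ (values : List String) (ns : PySem.Set Int),
      (x ∈ values.foldl (fun ns value =>
        match parse_range_bounds value with
        | some (s, some e) => PySem.Set.update ns (PySem.List.pyRange s (e + 1) 1)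
        | _ =>
          if PySem.Str.strIsdigit value then
            match PySem.Int.ofStr? value with
            | some n => PySem.Set.add ns n
            | none => ns
          else ns) ns
      ↔ x ∈ ns ∨ ∃ p ∈ pvIvs values, p.1 ≤ x ∧ x ≤ p.2) := by
  intro values
  induction values with
  | nil => simp [pvIvs]
  | cons v rest ih =>
    intro ns
    rw [List.foldl_cons, ih, pvIvs_cons]
    split
    · simp only [PySem.Set.mem_update, PySem.List.mem_pyRange_one, List.mem_cons,
        Int.lt_add_one_iff]
      constructor
      · rintro (⟨h | ⟨h1, h2⟩⟩ | ⟨p, hp, hb⟩)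
        · exact Or.inl h
        · exact Or.inr ⟨_, Or.inl rfl, h1, h2⟩
        · exact Or.inr ⟨p, Or.inr hp, hb⟩
      · rintro (h | ⟨p, rfl | hp, hb⟩)
        · exact Or.inl (Or.inl h)
        · exact Or.inl (Or.inr hb)
        · exact Or.inr ⟨p, hp, hb⟩
    · split
      · split
        · simp only [PySem.Set.mem_add, List.mem_cons]
          constructor
          · rintro (⟨h | rfl⟩ | ⟨p, hp, hb⟩)
            · exact Or.inl h
            · exact Or.inr ⟨_, Or.inl rfl, le_refl _, le_refl _⟩
            · exact Or.inr ⟨p, Or.inr hp, hb⟩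
          · rintro (h | ⟨p, rfl | hp, hb⟩)
            · exact Or.inl (Or.inl h)
            · exact Or.inl (Or.inr (le_antisymm hb.2 hb.1))
            · exact Or.inr ⟨p, hp, hb⟩
        · rfl
      · rfl

lemma nodup_A_fold :
    ∀ (values : List String) (ns : PySem.Set Int), ns.Nodup →
      (values.foldl (fun ns value =>
        match parse_range_bounds value with
        | some (s, some e) => PySem.Set.update ns (PySem.List.pyRange s (e + 1) 1)
        | _ =>
          if PySem.Str.strIsdigit value then
            match PySem.Int.ofStr? value with
            | some n => PySem.Set.add ns n
            | none => ns
          else ns) ns).Nodup := by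
  intro values
  induction values with
  | nil => intro ns h; exact h
  | cons v rest ih =>
    intro ns h
    rw [List.foldl_cons]
    apply ih
    split
    · exact PySem.Set.nodup_update _ _ h
    · split
      · split
        · exact PySem.Set.nodup_add _ _ h
        · exact h
      · exact h

lemma pvMergeGo_cons (cs ce s e : Int) (rest : List (Int × Int)) :
    pvMergeGo cs ce ((s, e) :: rest) =
      if s ≤ ce + 1 then pvMergeGo cs (max ce e) rest
      else (cs, ce) :: pvMergeGo s e rest := rfl

lemma mergeGo_flat (x : Int) :
    ∀ (l : List (Int × Int)) (cs ce : Int),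
      l.Pairwise (fun a b => a.1 ≤ b.1) → (∀ p ∈ l, cs ≤ p.1) →
      (x ∈ (pvMergeGo cs ce l).flatMap (fun p => PySem.List.pyRange p.1 (p.2 + 1) 1)
        ↔ (cs ≤ x ∧ x ≤ ce) ∨ ∃ p ∈ l, p.1 ≤ x ∧ x ≤ p.2) := by
  intro l
  induction l with
  | nil =>
    intro cs ce _ _
    simp only [pvMergeGo, List.flatMap_cons, List.flatMap_nil, List.append_nil,
      PySem.List.mem_pyRange_one, Int.lt_add_one_iff]
    simp
  | cons p rest ih =>
    obtain ⟨s, e⟩ := p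
    intro cs ce hpw hcs
    have hpwr := (List.pairwise_cons.mp hpw).2
    have hhead := (List.pairwise_cons.mp hpw).1
    have hcss : cs ≤ s := hcs (s, e) (List.mem_cons_self)
    rw [pvMergeGo_cons]
    split
    · rename_i hle
      rw [ih cs (max ce e) hpwr (fun p hp => hcs p (List.mem_cons_of_mem _ hp))]
      simp only [List.mem_cons]
      constructor
      · rintro (⟨h1, h2⟩ | ⟨p, hp, hb⟩)
        · by_cases hc : x ≤ ce
          · exact Or.inl ⟨h1, hc⟩
          · exact Or.inr ⟨(s, e), Or.inl rfl, by omega⟩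
        · exact Or.inr ⟨p, Or.inr hp, hb⟩
      · rintro (⟨h1, h2⟩ | ⟨p, rfl | hp, hb⟩)
        · exact Or.inl ⟨h1, by omega⟩
        · exact Or.inl (by dsimp at hb; omega)
        · exact Or.inr ⟨p, hp, hb⟩
    · rename_i hgt
      rw [List.flatMap_cons, List.mem_append,
        ih s e hpwr (fun p hp => hhead p hp)]
      simp only [PySem.List.mem_pyRange_one, Int.lt_add_one_iff, List.mem_cons]
      constructor
      · rintro (⟨h1, h2⟩ | ⟨h1, h2⟩ | ⟨p, hp, hb⟩)
        · exact Or.inl ⟨h1, h2⟩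
        · exact Or.inr ⟨(s, e), Or.inl rfl, h1, h2⟩
        · exact Or.inr ⟨p, Or.inr hp, hb⟩
      · rintro (⟨h1, h2⟩ | ⟨p, rfl | hp, hb⟩)
        · exact Or.inl ⟨h1, h2⟩
        · exact Or.inr (Or.inl (by dsimp at hb; omega))
        · exact Or.inr (Or.inr ⟨p, hp, hb⟩)

lemma mergeGo_sorted :
    ∀ (l : List (Int × Int)) (cs ce : Int),
      cs ≤ ce → (∀ p ∈ l, p.1 ≤ p.2) →
      l.Pairwise (fun a b => a.1 ≤ b.1) → (∀ p ∈ l, cs ≤ p.1) →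
      ((pvMergeGo cs ce l).flatMap (fun p => PySem.List.pyRange p.1 (p.2 + 1) 1)).Pairwise (· < ·)
        ∧ ∀ x ∈ (pvMergeGo cs ce l).flatMap (fun p => PySem.List.pyRange p.1 (p.2 + 1) 1), cs ≤ x := by
  intro l
  induction l with
  | nil =>
    intro cs ce _ _ _ _
    refine ⟨by simpa [pvMergeGo] using PySem.List.pairwise_lt_pyRange_one (a := cs) (b := ce + 1), ?_⟩
    intro x hx
    simp only [pvMergeGo, List.flatMap_cons, List.flatMap_nil, List.append_nil,
      PySem.List.mem_pyRange_one] at hx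
    exact hx.1
  | cons p rest ih =>
    obtain ⟨s, e⟩ := p
    intro cs ce hce hbnd hpw hcs
    have hpwr := (List.pairwise_cons.mp hpw).2
    have hhead := (List.pairwise_cons.mp hpw).1
    have hcss : cs ≤ s := hcs (s, e) (List.mem_cons_self)
    have hse : s ≤ e := hbnd (s, e) (List.mem_cons_self)
    have hbndr : ∀ p ∈ rest, p.1 ≤ p.2 := fun p hp => hbnd p (List.mem_cons_of_mem _ hp)
    rw [pvMergeGo_cons]
    split
    · rename_i hle
      exact ih cs (max ce e) (le_max_of_le_left hce) hbndr hpwr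
        (fun p hp => hcs p (List.mem_cons_of_mem _ hp))
    · rename_i hgt
      have hgt' : ce + 1 < s := by omega
      obtain ⟨ihpw, ihge⟩ := ih s e hse hbndr hpwr (fun p hp => hhead p hp)
      rw [List.flatMap_cons]
      constructor
      · rw [List.pairwise_append]
        refine ⟨by simpa using PySem.List.pairwise_lt_pyRange_one cs (ce + 1), ihpw, ?_⟩
        intro a ha b hb
        rw [PySem.List.mem_pyRange_one] at ha
        have := ihge b hb
        omega
      · intro x hx
        rcases List.mem_append.mp hx with h | h
        · exact (PySem.List.mem_pyRange_one.mp h).1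
        · exact le_trans hcss (ihge x h)

def pvNumbers (values : List String) : PySem.Set Int :=
  values.foldl (fun ns value =>
    match parse_range_bounds value with
    | some (s, some e) => PySem.Set.update ns (PySem.List.pyRange s (e + 1) 1)
    | _ =>
      if PySem.Str.strIsdigit value then
        match PySem.Int.ofStr? value with
        | some n => PySem.Set.add ns n
        | none => ns
      else ns) PySem.Set.empty

lemma A_eq (values : List String) :
    expand_numeric_targets_py values = PySem.List.sorted (pvNumbers values) (fun x => x) false := rfl

lemma B_eq (values : List String) :
    expand_numeric_targets_py_alt values =
      (match PySem.List.sorted (pvIvs values) (fun p => p.1) false with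
        | [] => ([] : List (Int × Int))
        | (s, e) :: rest => pvMergeGo s e rest).flatMap
        (fun p : Int × Int => PySem.List.pyRange p.1 (p.2 + 1) 1) := by
  rw [expand_numeric_targets_py_alt, pvCollect_eq_pvIvs]

lemma mem_numbers (x : Int) (values : List String) :
    x ∈ pvNumbers values ↔ ∃ p ∈ pvIvs values, p.1 ≤ x ∧ x ≤ p.2 := by
  rw [pvNumbers, mem_A_fold]
  simp [PySem.Set.empty]

-- ===== VERDICT (by name: the statement is the Claim_ definition above) =====
theorem expand_numeric_targets_py_spec : Claim_equal_expand_numeric_targets_py := by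
  intro values _
  unfold Spec_expand_numeric_targets_py
  show expand_numeric_targets_py values = expand_numeric_targets_py_alt values
  rw [A_eq, B_eq]
  have hAperm := PySem.List.sorted_perm (xs := pvNumbers values) (key := fun x : Int => x) (rev := false)
  have hAnodup : (PySem.List.sorted (pvNumbers values) (fun x => x) false).Nodup :=
    hAperm.nodup_iff.mpr (nodup_A_fold values PySem.Set.empty (by simp [PySem.Set.empty]))
  have hApw : (PySem.List.sorted (pvNumbers values) (fun x => x) false).Pairwise (· < ·) :=
    (List.Pairwise.and (PySem.List.sorted_pairwise (xs := pvNumbers values) (key := fun x : Int => x)) hAnodup).imp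
      (fun h => lt_of_le_of_ne h.1 h.2)
  have hAmem : ∀ x, x ∈ PySem.List.sorted (pvNumbers values) (fun x => x) false ↔
      ∃ p ∈ pvIvs values, p.1 ≤ x ∧ x ≤ p.2 := by
    intro x; rw [PySem.List.mem_sorted _ _ _ _, mem_numbers]
  have hSpw := PySem.List.sorted_pairwise (xs := pvIvs values) (key := fun p : Int × Int => p.1)
  have hSmem : ∀ p, p ∈ PySem.List.sorted (pvIvs values) (fun p => p.1) false ↔ p ∈ pvIvs values :=
    fun p => PySem.List.mem_sorted _ _ _ _
  haveI : Std.Antisymm (fun a b : Int => a < b) := ⟨fun a b h1 h2 => (lt_asymm h1 h2).elim⟩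
  cases hS : PySem.List.sorted (pvIvs values) (fun p => p.1) false with
  | nil =>
    have hL : pvIvs values = [] := (PySem.List.sorted_eq_nil_iff _ _ _).mp hS
    have hN : ∀ x, x ∉ PySem.List.sorted (pvNumbers values) (fun x => x) false := by
      intro x hx
      rcases (hAmem x).mp hx with ⟨p, hp, _⟩
      rw [hL] at hp; exact absurd hp (List.not_mem_nil)
    rw [List.eq_nil_iff_forall_not_mem.mpr hN]
    simp
  | cons p rest =>
    obtain ⟨s, e⟩ := p
    rw [hS] at hSpw hSmem
    have hpwr := (List.pairwise_cons.mp hSpw).2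
    have hhead := (List.pairwise_cons.mp hSpw).1
    have hbnd : ∀ p ∈ (s, e) :: rest, p.1 ≤ p.2 := by
      intro p hp; exact collect_bounds values p ((hSmem p).mp hp)
    have hse : s ≤ e := hbnd (s, e) (List.mem_cons_self)
    have hBmem : ∀ x : Int, _ := fun x => mergeGo_flat x rest s e hpwr (fun p hp => hhead p hp)
    obtain ⟨hBpw, _⟩ := mergeGo_sorted rest s e hse
      (fun p hp => hbnd p (List.mem_cons_of_mem _ hp)) hpwr (fun p hp => hhead p hp)
    have hBnodup : ((pvMergeGo s e rest).flatMap (fun p => PySem.List.pyRange p.1 (p.2 + 1) 1)).Nodup :=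
      hBpw.imp (fun h => ne_of_lt h)
    show PySem.List.sorted (pvNumbers values) (fun x => x) false =
      (pvMergeGo s e rest).flatMap (fun p => PySem.List.pyRange p.1 (p.2 + 1) 1)
    have hiff : ∀ x : Int, x ∈ PySem.List.sorted (pvNumbers values) (fun x => x) false ↔
        x ∈ (pvMergeGo s e rest).flatMap (fun p => PySem.List.pyRange p.1 (p.2 + 1) 1) := by
      intro x
      rw [hAmem, hBmem x]
      constructor
      · rintro ⟨p, hp, hb⟩
        rcases List.mem_cons.mp ((hSmem p).mpr hp) with h | h
        · subst h; exact Or.inl hb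
        · exact Or.inr ⟨p, h, hb⟩
      · rintro (hb | ⟨p, hp, hb⟩)
        · exact ⟨(s, e), (hSmem _).mp (List.mem_cons_self), hb⟩
        · exact ⟨p, (hSmem p).mp (List.mem_cons_of_mem _ hp), hb⟩
    exact ((List.perm_ext_iff_of_nodup hAnodup hBnodup).mpr hiff).eq_of_pairwise
      (fun a b _ _ h1 h2 => (lt_asymm h1 h2).elim) hApw hBpw
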